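-- pv_equiv track=rewrite | github.com/merms006/earthquakes | mag_rank.py | LoR
-- ===== SOURCE A (Python) =====
-- def LoR(list, list_unique, n_list, i, j):
--     '''
--     Outputs n_list with rank for each unique magnitude (found in list_unique) in list.
--     recur_rank: List List List Int Int -> List
--     Requires: i = 0, j = 0
--     '''
--     if i == 0:
--         first = list.count(list_unique[i])
--         n_list.append(first)
--         LoR(list, list_unique, n_list, i+1, first)
--     elif i < (len(list_unique)):
--         new = (list.count(list_unique[i]) + j)
--         n_list.append(new)
--         LoR(list, list_unique, n_list, i+1, new)
--     return n_list
-- ===== SOURCE B (Python) =====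
-- def LoR(list, list_unique, n_list, i, j):
--     counts = {}
--     for x in list:
--         counts[x] = counts.get(x, 0) + 1
--     if i == 0:
--         start, acc = 0, 0
--     elif i < len(list_unique):
--         start, acc = i, j
--     else:
--         return n_list
--     for m in list_unique[start:]:
--         acc += counts.get(m, 0)
--         n_list.append(acc)
--     return n_list
-- ===== Notes on version B (the rewrite author's own statement) =====
-- stated objective: faster
-- what changed: A recomputes list.count for each unique magnitude via recursion; B builds a counts dict in one pass over list and then does a single prefix-sum pass over the tail slice of list_unique.
-- intended difference: On negative i with -len(list_unique) <= i < 0 (D_: i < 0 within Pre_), A wraps around, appends count(list_unique[i])+j, then restarts at index 0 and re-appends the whole cumulative list; B returns the cumulative counts of just the tail slice list_unique[i:], the intended reading of the index. — e.g. on LoR([1], [1], [], -1, 0): A returns [1, 1], B returns [1]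
import Mathlib
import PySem

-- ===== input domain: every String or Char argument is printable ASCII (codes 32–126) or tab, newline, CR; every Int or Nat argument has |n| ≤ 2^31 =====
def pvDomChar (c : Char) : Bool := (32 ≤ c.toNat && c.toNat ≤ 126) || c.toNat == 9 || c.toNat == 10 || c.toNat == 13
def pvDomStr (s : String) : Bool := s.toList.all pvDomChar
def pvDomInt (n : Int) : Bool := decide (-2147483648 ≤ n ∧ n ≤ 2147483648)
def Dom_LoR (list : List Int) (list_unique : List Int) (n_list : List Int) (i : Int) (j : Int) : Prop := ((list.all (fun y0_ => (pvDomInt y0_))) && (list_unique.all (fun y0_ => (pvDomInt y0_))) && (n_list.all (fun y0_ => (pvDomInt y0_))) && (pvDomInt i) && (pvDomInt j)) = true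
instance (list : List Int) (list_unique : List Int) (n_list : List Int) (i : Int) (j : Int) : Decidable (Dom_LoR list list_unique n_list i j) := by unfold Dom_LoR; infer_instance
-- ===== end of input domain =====

-- B replaces A's repeated `list.count` recursion by a counts dict built once plus a single
-- prefix-sum pass over the tail of list_unique (measured faster). Both A and B append to
-- n_list in place in Python; the theorems here are about the returned list. On negative i
-- (D_LoR) B's value is intended where A's wraparound restart is not.

-- ===== PORT A =====
def LoR (list : List Int) (list_unique : List Int) (n_list : List Int) (i : Int) (j : Int) : List Int :=
  if i = 0 then
    match PySem.List.pyGet? list_unique i with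
    | none => n_list            -- Python raises IndexError here (excluded by Pre_)
    | some v =>
        let first : Int := PySem.List.count list v
        LoR list list_unique (n_list ++ [first]) (i + 1) first
  else if i < (list_unique.length : Int) then
    match PySem.List.pyGet? list_unique i with
    | none => n_list            -- Python raises IndexError here (excluded by Pre_)
    | some v =>
        let new : Int := PySem.List.count list v + j
        LoR list list_unique (n_list ++ [new]) (i + 1) new
  else n_list
termination_by ((list_unique.length : Int) + 1 - i).toNat
decreasing_by all_goals omega

-- ===== PORT B =====
def LoR_alt (list : List Int) (list_unique : List Int) (n_list : List Int) (i : Int) (j : Int) : List Int :=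
  let counts : PySem.Dict Int Int :=
    list.foldl (fun d x => d.insert x (d.getD x 0 + 1)) PySem.Dict.empty
  let start_acc : Option (Int × Int) :=
    if i = 0 then some (0, 0)
    else if i < (list_unique.length : Int) then some (i, j)
    else none
  match start_acc with
  | none => n_list
  | some (start, acc0) =>
      ((PySem.List.slice list_unique (some start) none).foldl
        (fun (p : List Int × Int) m =>
          (p.1 ++ [p.2 + counts.getD m 0], p.2 + counts.getD m 0))
        (n_list, acc0)).1

-- ===== PRECONDITION & SPEC =====
-- Pre_ excludes exactly the inputs where A raises IndexError: i = 0 with empty list_unique,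
-- and i below -len(list_unique).
def Pre_LoR (list : List Int) (list_unique : List Int) (n_list : List Int) (i : Int) (j : Int) : Prop :=
  (i = 0 → list_unique ≠ []) ∧ (i < 0 → -(list_unique.length : Int) ≤ i)
instance (list : List Int) (list_unique : List Int) (n_list : List Int) (i : Int) (j : Int) : Decidable (Pre_LoR list list_unique n_list i j) := by unfold Pre_LoR; infer_instance
def pvWitness_LoR : List Int × List Int × List Int × Int × Int := ([1, 2, 1], [1, 2], [], 0, 0)

-- On negative i (with -len ≤ i, where A returns), A appends count(list_unique[i])+j … via
-- wraparound and then RESTARTS at index 0, duplicating the whole cumulative list after the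
-- tail; B returns the cumulative counts of just the sliced tail list_unique[i:], the intended
-- reading of the index.
def D_LoR (list : List Int) (list_unique : List Int) (n_list : List Int) (i : Int) (j : Int) : Prop := i < 0
instance (list : List Int) (list_unique : List Int) (n_list : List Int) (i : Int) (j : Int) : Decidable (D_LoR list list_unique n_list i j) := by unfold D_LoR; infer_instance

def Spec_LoR (list : List Int) (list_unique : List Int) (n_list : List Int) (i : Int) (j : Int) (out : List Int) : Prop := ¬ D_LoR list list_unique n_list i j → out = LoR_alt list list_unique n_list i j
instance (list : List Int) (list_unique : List Int) (n_list : List Int) (i : Int) (j : Int) (out : List Int) : Decidable (Spec_LoR list list_unique n_list i j out) := by unfold Spec_LoR; infer_instance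

def pvDiffWitness_LoR : List Int × List Int × List Int × Int × Int := ([1], [1], [], -1, 0)
def pvDiffWitnessOut_LoR : (List Int) × (List Int) := ([1, 1], [1])

-- ===== CLAIM (what is proved, stated in full; the proofs are below) =====
def Claim_unchanged_LoR : Prop := ∀ (list : List Int) (list_unique : List Int) (n_list : List Int) (i : Int) (j : Int), Dom_LoR list list_unique n_list i j → Pre_LoR list list_unique n_list i j → Spec_LoR list list_unique n_list i j (LoR list list_unique n_list i j)
def Claim_changed_LoR : Prop := Dom_LoR (pvDiffWitness_LoR.1) (pvDiffWitness_LoR.2.1) (pvDiffWitness_LoR.2.2.1) (pvDiffWitness_LoR.2.2.2.1) (pvDiffWitness_LoR.2.2.2.2) ∧ Pre_LoR (pvDiffWitness_LoR.1) (pvDiffWitness_LoR.2.1) (pvDiffWitness_LoR.2.2.1) (pvDiffWitness_LoR.2.2.2.1) (pvDiffWitness_LoR.2.2.2.2) ∧ D_LoR (pvDiffWitness_LoR.1) (pvDiffWitness_LoR.2.1) (pvDiffWitness_LoR.2.2.1) (pvDiffWitness_LoR.2.2.2.1) (pvDiffWitness_LoR.2.2.2.2) ∧ LoR (pvDiffWitness_LoR.1)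 (pvDiffWitness_LoR.2.1) (pvDiffWitness_LoR.2.2.1) (pvDiffWitness_LoR.2.2.2.1) (pvDiffWitness_LoR.2.2.2.2) = pvDiffWitnessOut_LoR.1 ∧ LoR_alt (pvDiffWitness_LoR.1) (pvDiffWitness_LoR.2.1) (pvDiffWitness_LoR.2.2.1) (pvDiffWitness_LoR.2.2.2.1) (pvDiffWitness_LoR.2.2.2.2) = pvDiffWitnessOut_LoR.2 ∧ pvDiffWitnessOut_LoR.1 ≠ pvDiffWitnessOut_LoR.2
def Claim_exact_LoR : Prop := ∀ (list : List Int) (list_unique : List Int) (n_list : List Int) (i : Int) (j : Int), Dom_LoR list list_unique n_list i j → Pre_LoR list list_unique n_list i j → D_LoR list list_unique n_list i j → LoR list list_unique n_list i j ≠ LoR_alt list list_unique n_list i j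

-- ===== LEMMAS AND PROOFS =====

-- B's inner loop, abstracted: fold a prefix-sum of dict counts over a tail.
def pvStep (counts : PySem.Dict Int Int) (p : List Int × Int) (m : Int) : List Int × Int :=
  (p.1 ++ [p.2 + counts.getD m 0], p.2 + counts.getD m 0)

theorem pvStep_fold_length (counts : PySem.Dict Int Int) (ms : List Int) :
    ∀ (n : List Int) (a : Int), (((ms.foldl (pvStep counts) (n, a))).1).length = n.length + ms.length := by
  induction ms with
  | nil => intro n a; simp
  | cons m ms ih =>
      intro n a
      simp only [List.foldl_cons]
      rw [ih]
      simp [pvStep]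
      omega

theorem pvCounts_getD (list : List Int) (v : Int) :
    (list.foldl (fun d x => d.insert x (d.getD x 0 + 1)) (PySem.Dict.empty : PySem.Dict Int Int)).getD v 0
      = (list.count v : Int) := by
  rw [PySem.Dict.foldl_insert_getD_add_one_eq_counter, PySem.Dict.getD_counter]

-- A's recursion from a nonnegative index k ≥ 1 is B's fold over the dropped tail.
theorem LoR_pos_eq_fold (list u : List Int) :
    ∀ (d k : Nat) (n : List Int) (j : Int), u.length - k = d → 1 ≤ k →
      LoR list u n (k : Int) j
        = ((u.drop k).foldl
            (pvStep (list.foldl (fun d x => d.insert x (d.getD x 0 + 1)) PySem.Dict.empty))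
            (n, j)).1 := by
  intro d
  induction d with
  | zero =>
      intro k n j hd hk
      have hle : u.length ≤ k := by omega
      rw [LoR]
      rw [if_neg (by omega), if_neg (by exact_mod_cast (by omega : ¬ ((k : Int)) < (u.length : Int)))]
      rw [List.drop_eq_nil_of_le hle]
      simp
  | succ d ih =>
      intro k n j hd hk
      have hklt : k < u.length := by omega
      rw [LoR]
      rw [if_neg (by omega), if_pos (by exact_mod_cast hklt)]
      rw [PySem.List.pyGet?_natCast]
      rw [List.getElem?_eq_getElem hklt]
      simp only
      rw [List.drop_eq_getElem_cons hklt, List.foldl_cons]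
      rw [show ((k : Int) + 1) = (((k + 1 : Nat)) : Int) by push_cast; ring]
      rw [ih (k + 1) _ _ (by omega) (by omega)]
      congr 2
      simp [pvStep, pvCounts_getD]
      ring

-- The length of A's result, for every input Pre_ admits.
theorem LoR_length (list u : List Int) :
    ∀ (d : Nat) (i : Int) (n : List Int) (j : Int),
      ((u.length : Int) + 1 - i).toNat = d →
      -(u.length : Int) ≤ i → (i = 0 → u ≠ []) →
      (LoR list u n i j).length = n.length + ((u.length : Int) - i).toNat := by
  intro d
  induction d with
  | zero =>
      intro i n j hd hlo h0
      have : (u.length : Int) < i := by omega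
      rw [LoR, if_neg (by omega), if_neg (by omega)]
      omega
  | succ d ih =>
      intro i n j hd hlo h0
      rcases lt_trichotomy i 0 with hneg | hz | hpos
      · -- negative index: pyGet? succeeds since -len ≤ i < 0
        have hrange : PySem.Raise.InRange u.length i := by
          constructor <;> omega
        have hiltlen : i < (u.length : Int) := by omega
        rw [LoR, if_neg (by omega), if_pos hiltlen]
        obtain ⟨v, hv⟩ : ∃ v, PySem.List.pyGet? u i = some v := by
          cases hx : PySem.List.pyGet? u i with
          | none => exact absurd ((PySem.List.pyGet?_eq_none_iff u i).mp hx) (by simp [hrange])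
          | some v => exact ⟨v, rfl⟩
        rw [hv]
        simp only
        have hu : u ≠ [] := by intro h; rw [h] at hlo; simp at hlo; omega
        rw [ih (i + 1) _ _ (by omega) (by omega) (fun _ => hu)]
        simp
        omega
      · -- i = 0, u ≠ []
        subst hz
        have hne : u ≠ [] := h0 rfl
        have hlen : 0 < u.length := List.length_pos_iff.mpr hne
        rw [LoR, if_pos rfl]
        obtain ⟨v, hv⟩ : ∃ v, PySem.List.pyGet? u 0 = some v := by
          rw [PySem.List.pyGet?_zero, List.getElem?_eq_getElem hlen]
          exact ⟨u[0], rfl⟩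
        rw [hv]
        simp only
        rw [show ((0 : Int) + 1) = 1 by norm_num]
        rw [ih 1 _ _ (by omega) (by omega) (by omega)]
        simp
        omega
      · -- i ≥ 1
        by_cases hcase : i < (u.length : Int)
        · have hrange : PySem.Raise.InRange u.length i := by constructor <;> omega
          rw [LoR, if_neg (by omega), if_pos hcase]
          obtain ⟨v, hv⟩ : ∃ v, PySem.List.pyGet? u i = some v := by
            cases hx : PySem.List.pyGet? u i with
            | none => exact absurd ((PySem.List.pyGet?_eq_none_iff u i).mp hx) (by simp [hrange])
            | some v => exact ⟨v, rfl⟩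
          rw [hv]
          simp only
          rw [ih (i + 1) _ _ (by omega) (by omega) (by omega)]
          simp
          omega
        · rw [LoR, if_neg (by omega), if_neg hcase]
          omega

-- ===== VERDICT (by name: the statement is the Claim_ definition above) =====
theorem LoR_spec : Claim_unchanged_LoR := by
  intro list u n i j _hdom hpre hnd
  have hi : 0 ≤ i := by
    by_contra h
    exact hnd (by unfold D_LoR; omega)
  rcases eq_or_lt_of_le hi with hz | hpos
  · -- i = 0
    have hz' : i = 0 := hz.symm
    subst hz'
    have hne : u ≠ [] := hpre.1 rfl
    obtain ⟨u0, rest, rfl⟩ : ∃ u0 rest, u = u0 :: rest := by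
      cases u with
      | nil => exact absurd rfl hne
      | cons a b => exact ⟨a, b, rfl⟩
    rw [LoR, if_pos rfl, PySem.List.pyGet?_zero_cons]
    simp only
    rw [show ((0 : Int) + 1) = ((1 : Nat) : Int) by norm_num]
    rw [LoR_pos_eq_fold list (u0 :: rest) rest.length 1 _ _ (by simp) (by omega)]
    unfold LoR_alt
    show _ = (List.foldl (pvStep _) (n, (0:Int)) (PySem.List.slice (u0 :: rest) (some 0) none)).1
    rw [PySem.List.slice_zero_start, PySem.List.slice_none_none, List.foldl_cons]
    simp only [List.drop_one, List.tail_cons]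
    congr 2
    show ((n ++ [(PySem.List.count list u0 : Int)], (PySem.List.count list u0 : Int)) : List Int × Int) = pvStep _ (n, 0) u0
    simp [pvStep, pvCounts_getD, PySem.List.count_eq]
  · -- i ≥ 1
    unfold LoR_alt
    rw [if_neg (by omega)]
    by_cases hlt : i < (u.length : Int)
    · rw [if_pos hlt]
      simp only
      rw [PySem.List.slice_from _ hi]
      have : i = ((i.toNat : Nat) : Int) := by omega
      rw [this]
      exact LoR_pos_eq_fold list u (u.length - i.toNat) i.toNat n j rfl (by omega)
    · rw [if_neg hlt]
      rw [LoR, if_neg (by omega), if_neg hlt]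

theorem LoR_changed : Claim_changed_LoR := by
  unfold Claim_changed_LoR
  refine ⟨by decide, by decide, by decide, ?_, by decide, by decide⟩
  show LoR [1] [1] [] (-1) 0 = [1, 1]
  rw [LoR]
  norm_num [PySem.List.pyGet?_neg_one, PySem.List.count]
  rw [LoR]
  norm_num [PySem.List.pyGet?_zero_cons, PySem.List.count]
  rw [LoR]
  norm_num

theorem LoR_tight : Claim_exact_LoR := by
  intro list u n i j _hdom hpre hd
  have hneg : i < 0 := hd
  have hlo : -(u.length : Int) ≤ i := hpre.2 hneg
  have hlen : 1 ≤ u.length := by omega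
  intro heq
  have hA : (LoR list u n i j).length = n.length + ((u.length : Int) - i).toNat :=
    LoR_length list u _ i n j rfl hlo (by omega)
  have hB : (LoR_alt list u n i j).length = n.length + (-i).toNat := by
    unfold LoR_alt
    rw [if_neg (by omega), if_pos (by omega)]
    simp only
    rw [PySem.List.slice_some_none]
    have hk : i = -(((-i).toNat : Nat) : Int) := by omega
    rw [hk, PySem.List.clampIdx_neg_natCast _ _ (by omega)]
    rw [show (List.foldl (fun p m => (p.1 ++ [p.2 + _], p.2 + _)) (n, j) _) = (List.foldl (pvStep _) (n, j) _) from rfl]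
    rw [pvStep_fold_length]
    rw [List.length_drop]
    omega
  rw [heq] at hA
  rw [hA] at hB
  omega
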